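-- pv_equiv track=rewrite | github.com/zeeshan4002911/DSA-reloaded | 1.data-structure/2.string/easy/character-frequency-in-alphabetical-order.py | character_frequency_in_alphabetical_order
-- ===== SOURCE A (Python) =====
-- def character_frequency_in_alphabetical_order(s):
--     count_arr = [0] * 26
--     result = ""
--
--     # Count of occurrence for each character
--     for char in s:
--         char_ascii = ord(char.lower()) - ord("a")
--         if 0 <= char_ascii < 26:
--             count_arr[char_ascii] += 1
--
--     # Formation of result in required format
--     for i in range(26):
--         if count_arr[i] > 0:
--             char = chr(ord("a") + i)
--             result += char + str(count_arr[i])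
--
--     return result
-- ===== SOURCE B (Python) =====
-- def character_frequency_in_alphabetical_order(s):
--     # Collect the lowercase form of every letter, then sort and scan runs,
--     # instead of maintaining a 26-slot count array.
--     letters = []
--     for char in s:
--         idx = ord(char.lower()) - ord("a")
--         if 0 <= idx < 26:
--             letters.append(chr(ord("a") + idx))
--     letters.sort()
--     parts = []
--     i = 0
--     n = len(letters)
--     while i < n:
--         j = i
--         while j < n and letters[j] == letters[i]:
--             j += 1
--         parts.append(letters[i] + str(j - i))
--         i = j
--     return "".join(parts)
-- ===== Notes on version B (the rewrite author's own statement) =====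
-- stated objective: alternative
-- what changed: Replaces A's fixed 26-slot count array and fixed-range scan with collect-the-lowered-letters, sort, then scan runs with two indices, emitting letter+count per run.
import Mathlib
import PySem

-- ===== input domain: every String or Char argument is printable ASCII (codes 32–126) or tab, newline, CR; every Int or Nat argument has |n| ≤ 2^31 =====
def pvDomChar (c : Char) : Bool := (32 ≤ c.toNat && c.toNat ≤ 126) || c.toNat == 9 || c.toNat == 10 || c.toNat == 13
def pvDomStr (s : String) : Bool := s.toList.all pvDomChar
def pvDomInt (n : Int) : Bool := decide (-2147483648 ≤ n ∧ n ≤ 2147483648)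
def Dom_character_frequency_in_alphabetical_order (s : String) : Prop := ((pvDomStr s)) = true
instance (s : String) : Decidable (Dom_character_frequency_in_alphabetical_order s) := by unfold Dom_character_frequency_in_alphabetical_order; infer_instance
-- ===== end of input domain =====

-- B replaces A's fixed 26-slot count array with collect-sort-and-scan-runs (alternative decomposition, not faster).
-- On the printable-ASCII domain char.lower() is a single character, so A is total there.

-- ===== PORT A =====
-- one step of A's counting loop: char_ascii = ord(char.lower()) - ord('a'); guarded increment
def cfStepA (arr : List Int) (ch : Char) : List Int :=
  let ca : Int := ((ch.toLower).toNat : Int) - 97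
  if 0 ≤ ca ∧ ca < 26 then arr.set ca.toNat (arr.getD ca.toNat 0 + 1) else arr

def character_frequency_in_alphabetical_order (s : String) : String :=
  let arr := s.toList.foldl cfStepA (List.replicate 26 0)
  (List.range 26).foldl
    (fun r i =>
      if arr.getD i 0 > 0 then r ++ String.ofList [Char.ofNat (97 + i)] ++ PySem.Int.toStr (arr.getD i 0)
      else r) ""

-- ===== PORT B =====
-- letters list: lowered valid letters, appended in order
def cfLettersB (s : String) : List Char :=
  s.toList.foldl
    (fun acc ch =>
      let idx : Int := ((ch.toLower).toNat : Int) - 97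
      if 0 ≤ idx ∧ idx < 26 then acc ++ [Char.ofNat (97 + idx.toNat)] else acc) []

-- the run-scanning while loop: take the run of letters[i], emit letters[i] + str(run length), continue after it
def cfGroupsB : List Char → List String
  | [] => []
  | c :: rest =>
    (String.ofList [c] ++ PySem.Int.toStr ((1 + (rest.takeWhile (· == c)).length : Nat) : Int))
      :: cfGroupsB (rest.dropWhile (· == c))
  termination_by l => l.length
  decreasing_by simp [List.length_dropWhile_le]

def character_frequency_in_alphabetical_order_alt (s : String) : String :=
  String.join (cfGroupsB (PySem.List.sorted (cfLettersB s) (fun x => x) false))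

-- ===== PRECONDITION & SPEC =====
def Spec_character_frequency_in_alphabetical_order (s : String) (out : String) : Prop := out = character_frequency_in_alphabetical_order_alt s
instance (s : String) (out : String) : Decidable (Spec_character_frequency_in_alphabetical_order s out) := by unfold Spec_character_frequency_in_alphabetical_order; infer_instance

-- ===== CLAIM (what is proved, stated in full; the proofs are below) =====
def Claim_equal_character_frequency_in_alphabetical_order : Prop := ∀ (s : String), Dom_character_frequency_in_alphabetical_order s → Spec_character_frequency_in_alphabetical_order s (character_frequency_in_alphabetical_order s)

-- ===== LEMMAS AND PROOFS =====

-- the list of letter indices (0..25) that both programs filter out of s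
def cfIdxs (l : List Char) : List Nat :=
  l.filterMap (fun ch =>
    let ca : Int := ((ch.toLower).toNat : Int) - 97
    if 0 ≤ ca ∧ ca < 26 then some ca.toNat else none)

-- canonical sorted letter list: counts per letter, in alphabetical order
def cfCanon (cnt : Nat → Nat) : Nat → List Char
  | 0 => []
  | n + 1 => cfCanon cnt n ++ List.replicate (cnt n) (Char.ofNat (97 + n))

theorem cfIdxs_lt (l : List Char) : ∀ i ∈ cfIdxs l, i < 26 := by
  intro i hi
  simp only [cfIdxs, List.mem_filterMap] at hi
  obtain ⟨c, _, hc⟩ := hi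
  split at hc
  · rename_i h; cases hc; omega
  · cases hc

theorem cfA_arr_spec (l : List Char) (arr : List Int) (h : arr.length = 26) :
    (l.foldl cfStepA arr).length = 26 ∧
      ∀ i < 26, (l.foldl cfStepA arr).getD i 0 = arr.getD i 0 + ((cfIdxs l).count i : Int) := by
  induction l generalizing arr with
  | nil => exact ⟨h, by simp [cfIdxs]⟩
  | cons c t ih =>
    simp only [List.foldl_cons]
    have hlen : (cfStepA arr c).length = 26 := by
      simp only [cfStepA]; split <;> simp [h]
    obtain ⟨h1, h2⟩ := ih (cfStepA arr c) hlen
    refine ⟨h1, fun i hi => ?_⟩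
    rw [h2 i hi]
    simp only [cfIdxs, List.filterMap_cons]
    by_cases hc : (0:Int) ≤ ((c.toLower).toNat : Int) - 97 ∧ ((c.toLower).toNat : Int) - 97 < 26
    · have hstep : cfStepA arr c
          = arr.set ((((c.toLower).toNat : Int) - 97).toNat)
              (arr.getD ((((c.toLower).toNat : Int) - 97).toNat) 0 + 1) := by
        unfold cfStepA; exact if_pos hc
      rw [hstep, if_pos hc]
      set j := ((((c.toLower).toNat : Int) - 97).toNat) with hjdef
      have hjlen : j < arr.length := by
        rw [h]; omega
      rw [List.count_cons]
      by_cases he : j = i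
      · subst he
        rw [List.getD_eq_getElem?_getD, List.getElem?_set_self hjlen, Option.getD_some,
          List.getD_eq_getElem?_getD]
        simp only [BEq.rfl, if_true]
        push_cast
        ring
      · have hne : (j == i) = false := by simp [he]
        rw [List.getD_eq_getElem?_getD, List.getElem?_set_ne he, ← List.getD_eq_getElem?_getD, hne]
        simp
    · have hstep : cfStepA arr c = arr := by
        unfold cfStepA; exact if_neg hc
      rw [hstep, if_neg hc]

-- Char.ofNat on small codes
theorem cfToNat_ofNat (n : Nat) (h : n < 55296) : (Char.ofNat n).toNat = n := by
  rw [Char.toNat_ofNat, if_pos (Or.inl h : Nat.isValidChar n)]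

theorem cfChr_lt_of_toNat_lt (a : Char) (j : Nat) (hj : j < 26) (h : a.toNat < 97 + j) :
    a < Char.ofNat (97 + j) := by
  have h2 := cfToNat_ofNat (97 + j) (by omega)
  rw [Char.lt_def, UInt32.lt_iff_toNat_lt]
  change a.toNat < (Char.ofNat (97 + j)).toNat
  omega

theorem cfChr_inj (i j : Nat) (hi : i < 26) (hj : j < 26)
    (h : Char.ofNat (97 + i) = Char.ofNat (97 + j)) : i = j := by
  have := congrArg Char.toNat h
  rw [cfToNat_ofNat (97 + i) (by omega), cfToNat_ofNat (97 + j) (by omega)] at this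
  omega

theorem cfLettersB_aux (l : List Char) (acc : List Char) :
    (l.foldl
      (fun acc ch =>
        let idx : Int := ((ch.toLower).toNat : Int) - 97
        if 0 ≤ idx ∧ idx < 26 then acc ++ [Char.ofNat (97 + idx.toNat)] else acc) acc) =
    acc ++ (cfIdxs l).map (fun i => Char.ofNat (97 + i)) := by
  induction l generalizing acc with
  | nil => simp [cfIdxs]
  | cons c t ih =>
    simp only [List.foldl_cons, cfIdxs, List.filterMap_cons]
    by_cases hc : (0:Int) ≤ ((c.toLower).toNat : Int) - 97 ∧ ((c.toLower).toNat : Int) - 97 < 26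
    · rw [if_pos hc, ih, if_pos hc]
      simp [cfIdxs]
    · rw [if_neg hc, ih, if_neg hc]
      rfl

theorem cfLettersB_eq (s : String) :
    cfLettersB s = (cfIdxs s.toList).map (fun i => Char.ofNat (97 + i)) := by
  have h := cfLettersB_aux s.toList []
  rw [List.nil_append] at h
  exact h

theorem cfCount_map_chr (idxs : List Nat) (h : ∀ i ∈ idxs, i < 26) (j : Nat) (hj : j < 26) :
    ((idxs.map (fun i => Char.ofNat (97 + i))).count (Char.ofNat (97 + j))) = idxs.count j := by
  induction idxs with
  | nil => rfl
  | cons i t ih =>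
    have hi : i < 26 := h i (by simp)
    have ht : ∀ k ∈ t, k < 26 := fun k hk => h k (by simp [hk])
    simp only [List.map_cons, List.count_cons, ih ht]
    by_cases he : i = j
    · subst he; simp
    · have h1 : (Char.ofNat (97 + i) == Char.ofNat (97 + j)) = false := by
        simp only [beq_eq_false_iff_ne, ne_eq]
        intro hcontra; exact he (cfChr_inj i j hi hj hcontra)
      have h2 : (i == j) = false := by simp [he]
      rw [h1, h2]

theorem cfCount_map_not (idxs : List Nat) (h : ∀ i ∈ idxs, i < 26) (a : Char)
    (ha : ∀ j, j < 26 → a ≠ Char.ofNat (97 + j)) :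
    ((idxs.map (fun i => Char.ofNat (97 + i))).count a) = 0 := by
  induction idxs with
  | nil => rfl
  | cons i t ih =>
    have hi : i < 26 := h i (by simp)
    have ht : ∀ k ∈ t, k < 26 := fun k hk => h k (by simp [hk])
    simp only [List.map_cons, List.count_cons, ih ht]
    have : (Char.ofNat (97 + i) == a) = false := by
      simp only [beq_eq_false_iff_ne, ne_eq]
      intro hcontra; exact ha i hi hcontra.symm
    rw [this]
    simp

theorem cfCount_canon_chr (cnt : Nat → Nat) (n : Nat) (hn : n ≤ 26) (j : Nat) (hj : j < 26) :
    (cfCanon cnt n).count (Char.ofNat (97 + j)) = if j < n then cnt j else 0 := by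
  induction n with
  | zero => simp [cfCanon]
  | succ m ih =>
    simp only [cfCanon, List.count_append, ih (by omega), List.count_replicate]
    by_cases he : m = j
    · subst he
      have : (Char.ofNat (97 + m) == Char.ofNat (97 + m)) = true := by simp
      rw [this]
      simp
    · have : (Char.ofNat (97 + m) == Char.ofNat (97 + j)) = false := by
        simp only [beq_eq_false_iff_ne, ne_eq]
        intro hcontra; exact he (cfChr_inj m j (by omega) hj hcontra)
      rw [this]
      simp only [Bool.false_eq_true, if_false, Nat.add_zero]
      by_cases hlt : j < m
      · rw [if_pos hlt, if_pos (by omega)]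
      · rw [if_neg hlt, if_neg (by omega)]

theorem cfCount_canon_not (cnt : Nat → Nat) (n : Nat) (hn : n ≤ 26) (a : Char)
    (ha : ∀ j, j < 26 → a ≠ Char.ofNat (97 + j)) :
    (cfCanon cnt n).count a = 0 := by
  induction n with
  | zero => simp [cfCanon]
  | succ m ih =>
    simp only [cfCanon, List.count_append, ih (by omega), List.count_replicate]
    have : (Char.ofNat (97 + m) == a) = false := by
      simp only [beq_eq_false_iff_ne, ne_eq]
      intro hcontra; exact ha m (by omega) hcontra.symm
    rw [this]
    simp

theorem cfCanon_perm (idxs : List Nat) (hlt : ∀ i ∈ idxs, i < 26) :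
    (cfCanon (fun i => idxs.count i) 26).Perm (idxs.map (fun i => Char.ofNat (97 + i))) := by
  rw [List.perm_iff_count]
  intro a
  by_cases h : ∃ j, j < 26 ∧ a = Char.ofNat (97 + j)
  · obtain ⟨j, hj, rfl⟩ := h
    rw [cfCount_canon_chr _ 26 le_rfl j hj, cfCount_map_chr idxs hlt j hj, if_pos hj]
  · push Not at h
    rw [cfCount_canon_not _ 26 le_rfl a (fun j hj => h j hj),
      cfCount_map_not idxs hlt a (fun j hj => h j hj)]

theorem cfCanon_pairwise (cnt : Nat → Nat) (n : Nat) (hn : n ≤ 26) :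
    (cfCanon cnt n).Pairwise (· ≤ ·) ∧ ∀ c ∈ cfCanon cnt n, c.toNat < 97 + n := by
  induction n with
  | zero => simp [cfCanon]
  | succ m ih =>
    obtain ⟨hpw, hbd⟩ := ih (by omega)
    have hrep : ∀ c ∈ List.replicate (cnt m) (Char.ofNat (97 + m)), c = Char.ofNat (97 + m) :=
      fun c hc => List.eq_of_mem_replicate hc
    have htn : (Char.ofNat (97 + m)).toNat = 97 + m := cfToNat_ofNat _ (by omega)
    constructor
    · rw [cfCanon, List.pairwise_append]
      refine ⟨hpw, ?_, ?_⟩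
      · rw [List.pairwise_replicate]
        right; exact le_refl _
      · intro a ha b hb
        rw [hrep b hb]
        exact le_of_lt (cfChr_lt_of_toNat_lt a m (by omega) (hbd a ha))
    · intro c hc
      rw [cfCanon, List.mem_append] at hc
      rcases hc with hc | hc
      · have := hbd c hc; omega
      · rw [hrep c hc, htn]; omega

theorem cfTakeWhile_all_false (p : Char → Bool) (m : List Char) (h : ∀ x ∈ m, p x = false) :
    m.takeWhile p = [] := by
  cases m with
  | nil => rfl
  | cons a t => simp [h a (by simp)]

theorem cfDropWhile_all_false (p : Char → Bool) (m : List Char) (h : ∀ x ∈ m, p x = false) :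
    m.dropWhile p = m := by
  cases m with
  | nil => rfl
  | cons a t => simp [h a (by simp)]

theorem cfGroupsB_append (l m : List Char) (h : ∀ a ∈ l, ∀ b ∈ m, a < b) :
    cfGroupsB (l ++ m) = cfGroupsB l ++ cfGroupsB m := by
  match l with
  | [] =>
    have h0 : cfGroupsB ([] : List Char) = [] := by rw [cfGroupsB]
    simp [h0]
  | c :: rest =>
    have hm : ∀ x ∈ m, (x == c) = false := by
      intro x hx
      have hlt := h c (by simp) x hx
      simp only [beq_eq_false_iff_ne, ne_eq]
      intro he; subst he; exact lt_irrefl _ hlt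
    have hrec := cfGroupsB_append (rest.dropWhile (· == c)) m
      (fun a ha b hb => h a (by
        have : a ∈ rest := List.Sublist.mem ha (List.dropWhile_sublist _)
        simp [this]) b hb)
    have hsplit := List.takeWhile_append_dropWhile (p := (· == c)) (l := rest)
    have h0 : cfGroupsB ([] : List Char) = [] := by rw [cfGroupsB]
    by_cases he : rest.dropWhile (· == c) = []
    · have htake : rest.takeWhile (· == c) = rest := by
        rw [he, List.append_nil] at hsplit; exact hsplit
      have htA : (rest ++ m).takeWhile (· == c) = rest := by
        rw [List.takeWhile_append, htake, if_pos rfl, cfTakeWhile_all_false _ m hm, List.append_nil]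
      have hdA : (rest ++ m).dropWhile (· == c) = m := by
        rw [List.dropWhile_append, he]
        simp [cfDropWhile_all_false _ m hm]
      have hL : cfGroupsB (c :: (rest ++ m))
          = (String.ofList [c] ++ PySem.Int.toStr ((1 + rest.length : Nat) : Int)) :: cfGroupsB m := by
        rw [cfGroupsB, htA, hdA]
      have hR : cfGroupsB (c :: rest)
          = [String.ofList [c] ++ PySem.Int.toStr ((1 + rest.length : Nat) : Int)] := by
        rw [cfGroupsB, htake, he, h0]
      rw [List.cons_append, hL, hR]
      rfl
    · have hlen : (rest.takeWhile (· == c)).length ≠ rest.length := by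
        intro hcontra
        have hlsum := congrArg List.length hsplit
        rw [List.length_append] at hlsum
        have : (rest.dropWhile (· == c)).length = 0 := by omega
        exact he (List.eq_nil_of_length_eq_zero this)
      have htA : (rest ++ m).takeWhile (· == c) = rest.takeWhile (· == c) := by
        rw [List.takeWhile_append, if_neg hlen]
      have hdA : (rest ++ m).dropWhile (· == c) = rest.dropWhile (· == c) ++ m := by
        rw [List.dropWhile_append]
        have hne : (rest.dropWhile (· == c)).isEmpty = false := by
          simp [he]
        rw [hne]
        simp
      have hL : cfGroupsB (c :: (rest ++ m))
          = (String.ofList [c] ++ PySem.Int.toStr ((1 + (rest.takeWhile (· == c)).length : Nat) : Int))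
            :: cfGroupsB (rest.dropWhile (· == c) ++ m) := by
        rw [cfGroupsB, htA, hdA]
      have hR : cfGroupsB (c :: rest)
          = (String.ofList [c] ++ PySem.Int.toStr ((1 + (rest.takeWhile (· == c)).length : Nat) : Int))
            :: cfGroupsB (rest.dropWhile (· == c)) := by
        rw [cfGroupsB]
      rw [List.cons_append, hL, hR, hrec]
      rfl
  termination_by l.length
  decreasing_by
    simp only [List.length_cons]
    have := List.length_dropWhile_le (p := (· == c)) (l := rest)
    omega

theorem cfGroupsB_replicate (k : Nat) (c : Char) (hk : 0 < k) :
    cfGroupsB (List.replicate k c) = [String.ofList [c] ++ PySem.Int.toStr (k : Int)] := by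
  obtain ⟨k', rfl⟩ : ∃ k', k = k' + 1 := ⟨k - 1, by omega⟩
  rw [List.replicate_succ, cfGroupsB,
    List.takeWhile_eq_self_iff.mpr (by intro x hx; simp [List.eq_of_mem_replicate hx]),
    List.dropWhile_eq_nil_iff.mpr (by intro x hx; simp [List.eq_of_mem_replicate hx])]
  simp [cfGroupsB, Nat.add_comm]

theorem cfJoin_canon (cnt : Nat → Nat) (n : Nat) (hn : n ≤ 26) :
    String.join (cfGroupsB (cfCanon cnt n)) =
      (List.range n).foldl
        (fun r i =>
          if ((cnt i : Int)) > 0 then r ++ String.ofList [Char.ofNat (97 + i)] ++ PySem.Int.toStr ((cnt i : Nat) : Int)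
          else r) "" := by
  induction n with
  | zero => simp [cfCanon, cfGroupsB, String.join]
  | succ m ih =>
    have hbd := (cfCanon_pairwise cnt m (by omega)).2
    have hcross : ∀ a ∈ cfCanon cnt m, ∀ b ∈ List.replicate (cnt m) (Char.ofNat (97 + m)), a < b := by
      intro a ha b hb
      rw [List.eq_of_mem_replicate hb]
      exact cfChr_lt_of_toNat_lt a m (by omega) (hbd a ha)
    rw [cfCanon, cfGroupsB_append _ _ hcross, List.range_succ, List.foldl_append,
      ← ih (by omega)]
    simp only [List.foldl_cons, List.foldl_nil]
    by_cases hz : 0 < cnt m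
    · rw [cfGroupsB_replicate _ _ hz]
      have hpos : ((cnt m : Int)) > 0 := by exact_mod_cast hz
      rw [if_pos hpos]
      simp [String.join, String.append_assoc]
    · have : cnt m = 0 := by omega
      rw [this]
      simp [cfGroupsB, String.join]

-- ===== VERDICT (by name: the statement is the Claim_ definition above) =====
theorem character_frequency_in_alphabetical_order_spec : Claim_equal_character_frequency_in_alphabetical_order := by
  intro s _
  unfold Spec_character_frequency_in_alphabetical_order
  unfold character_frequency_in_alphabetical_order character_frequency_in_alphabetical_order_alt
  have hlt := cfIdxs_lt s.toList
  have harr := cfA_arr_spec s.toList (List.replicate 26 0) (by simp)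
  have hget : ∀ i < 26,
      (s.toList.foldl cfStepA (List.replicate 26 0)).getD i 0 = (((cfIdxs s.toList).count i : Nat) : Int) := by
    intro i hi
    rw [harr.2 i hi, List.getD_eq_getElem?_getD, List.getElem?_replicate]
    simp [hi]
  rw [PySem.List.foldl_congr_mem (List.range 26) _
    (fun r i =>
      if ((((cfIdxs s.toList).count i : Nat) : Int)) > 0 then
        r ++ String.ofList [Char.ofNat (97 + i)] ++ PySem.Int.toStr ((((cfIdxs s.toList).count i : Nat)) : Int)
      else r) ""
    (by
      intro acc x hx
      rw [List.mem_range] at hx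
      rw [hget x hx])]
  rw [cfLettersB_eq s,
    PySem.List.sorted_id_eq_of_perm_of_pairwise _ _ (cfCanon_perm (cfIdxs s.toList) hlt)
      (cfCanon_pairwise (fun i => (cfIdxs s.toList).count i) 26 le_rfl).1,
    cfJoin_canon (fun i => (cfIdxs s.toList).count i) 26 le_rfl]
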